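-- pv_equiv track=rewrite | github.com/val-is/advent-of-code | 2023/day13.py | find_symm
-- ===== SOURCE A (Python) =====
-- def find_symm(bms):
--     possible = []
--     for split in range(1, len(bms)):
--         a, b = bms[:split], bms[split:]
--         a = a[::-1]
--         sym = True
--         for k in range(min(len(a), len(b))):
--             if a[k] != b[k]:
--                 sym = False
--                 break
--         if sym:
--             possible.append(split)
--     return possible
-- ===== SOURCE B (Python) =====
-- def _pal_prefix_splits(seq, half):
--     # splits s in [1, half] whose prefix window seq[:2*s] is a palindrome
--     out = []
--     for s in range(1, half + 1):
--         w = seq[:2 * s]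
--         if w == w[::-1]:
--             out.append(s)
--     return out
--
--
-- def find_symm(bms):
--     # Reduction: split s is a mirror iff the window of bms touching the nearer
--     # edge and centred at s is a palindrome — i.e. s <= n//2 with a palindromic
--     # prefix of length 2s, or s > n//2 with a palindromic suffix of length
--     # 2(n-s), found as a palindromic prefix of the reversed sequence.
--     n = len(bms)
--     left = _pal_prefix_splits(bms, n // 2)
--     right = _pal_prefix_splits(bms[::-1], (n - 1) // 2)
--     return left + [n - t for t in reversed(right)]
-- ===== Notes on version B (the rewrite author's own statement) =====
-- stated objective: alternative
-- what changed: B replaces A's per-split reversed-prefix-vs-suffix elementwise scan by a reduction to palindromic prefixes: a split is a mirror iff the boundary-touching window centred at it is a palindrome, so B collects palindromic even prefixes of bms (splits in the left half) and of reversed bms (right half) in two staged passes and concatenates.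
import Mathlib
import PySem

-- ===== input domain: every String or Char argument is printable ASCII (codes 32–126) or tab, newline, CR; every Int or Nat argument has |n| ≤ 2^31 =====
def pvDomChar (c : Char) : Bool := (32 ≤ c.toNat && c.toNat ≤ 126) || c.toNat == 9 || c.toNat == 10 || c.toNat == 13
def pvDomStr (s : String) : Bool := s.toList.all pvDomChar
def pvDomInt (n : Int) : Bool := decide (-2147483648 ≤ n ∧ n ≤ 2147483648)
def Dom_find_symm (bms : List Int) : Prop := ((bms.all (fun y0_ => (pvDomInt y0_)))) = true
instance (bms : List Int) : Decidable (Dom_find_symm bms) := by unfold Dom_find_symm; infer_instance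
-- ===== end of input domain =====

-- B reduces the mirror test to palindromic prefixes: a split is a mirror iff the
-- boundary-touching window centred at it is a palindrome, so B collects palindromic
-- even prefixes of bms and of reversed bms in two staged passes; objective: alternative.

-- ===== PORT A =====
-- inner loop 'for k in range(...): if a[k] != b[k]: sym = False; break'
def findSymmInner (a b : List Int) : List Int → Bool
  | [] => true
  | k :: ks =>
    if PySem.List.pyGet? a k ≠ PySem.List.pyGet? b k then false
    else findSymmInner a b ks

def find_symm (bms : List Int) : List Int :=
  (PySem.List.pyRange 1 (bms.length : Int) 1).foldl
    (fun possible split =>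
      let a := PySem.List.slice bms none (some split)          -- bms[:split]
      let b := PySem.List.slice bms (some split) none          -- bms[split:]
      let a := (PySem.List.slice? a none none (-1)).getD []    -- a[::-1] (never raises: step ≠ 0)
      let sym := findSymmInner a b
        (PySem.List.pyRange 0 (min (a.length : Int) (b.length : Int)) 1)
      if sym then possible ++ [split] else possible)
    []

-- ===== PORT B =====
-- helper _pal_prefix_splits: 'for s in range(1, half+1): w = seq[:2*s]; if w == w[::-1]: out.append(s)'
def palPrefixSplits (seq : List Int) (half : Int) : List Int :=
  (PySem.List.pyRange 1 (half + 1) 1).foldl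
    (fun out s =>
      let w := PySem.List.slice seq none (some (2 * s))                 -- seq[:2*s]
      if w == (PySem.List.slice? w none none (-1)).getD []              -- w == w[::-1]
      then out ++ [s] else out)
    []

def find_symm_alt (bms : List Int) : List Int :=
  let n : Int := (bms.length : Int)
  let left := palPrefixSplits bms (PySem.Int.floordiv n 2)
  let right := palPrefixSplits ((PySem.List.slice? bms none none (-1)).getD [])
                 (PySem.Int.floordiv (n - 1) 2)
  left ++ right.reverse.map (fun t => n - t)                            -- [n - t for t in reversed(right)]

-- ===== PRECONDITION & SPEC =====
def Spec_find_symm (bms : List Int) (out : List Int) : Prop := out = find_symm_alt bms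
instance (bms : List Int) (out : List Int) : Decidable (Spec_find_symm bms out) := by unfold Spec_find_symm; infer_instance

-- ===== CLAIM (what is proved, stated in full; the proofs are below) =====
def Claim_equal_find_symm : Prop := ∀ (bms : List Int), Dom_find_symm bms → Spec_find_symm bms (find_symm bms)

-- ===== LEMMAS AND PROOFS =====

-- the mirror test at a split point (A's semantics, proved of both ports)
def mirror (bms : List Int) (s : Int) : Bool :=
  (((bms.take s.toNat).reverse).zip (bms.drop s.toNat)).all (fun p => p.1 == p.2)

-- A's inner loop with break computes the conjunction over the index list
theorem findSymmInner_eq_all (a b : List Int) (l : List Int) :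
    findSymmInner a b l = l.all (fun k => PySem.List.pyGet? a k == PySem.List.pyGet? b k) := by
  induction l with
  | nil => rfl
  | cons k ks ih =>
    simp only [findSymmInner, List.all_cons, ih]
    by_cases h : PySem.List.pyGet? a k = PySem.List.pyGet? b k <;> simp [h]

-- index-by-index comparison over range(min(len a, len b)) is zip/all
theorem all_range_eq_zip_all (a b : List Int) :
    ((List.range (min a.length b.length)).all (fun k => a[k]? == b[k]?))
    = (a.zip b).all (fun p => p.1 == p.2) := by
  induction a generalizing b with
  | nil => simp
  | cons x a' ih =>
    cases b with
    | nil => simp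
    | cons y b' =>
      have hmin : min (x :: a').length (y :: b').length = min a'.length b'.length + 1 := by
        simp only [List.length_cons]; omega
      rw [hmin, List.range_succ_eq_map]
      simp only [List.all_cons, List.all_map, Function.comp_def, List.getElem?_cons_zero,
        List.getElem?_cons_succ, List.zip_cons_cons, ih b']
      by_cases h : x = y <;> simp [h]

-- A computes the filter of the mirror test over range(1, len(bms))
theorem find_symm_eq_filter (bms : List Int) :
    find_symm bms = (PySem.List.pyRange 1 (bms.length : Int) 1).filter (mirror bms) := by
  unfold find_symm
  rw [PySem.List.foldl_append_if_eq_filter]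
  rw [List.nil_append]
  apply List.filter_congr
  intro s hs
  rw [PySem.List.mem_pyRange_one] at hs
  obtain ⟨h1, h2⟩ := hs
  have h0 : (0 : Int) ≤ s := by omega
  simp only [PySem.List.slice_to bms h0, PySem.List.slice_from bms h0,
    PySem.List.slice?_none_none_neg_one, Option.getD_some]
  rw [findSymmInner_eq_all]
  have hmin : (min (((bms.take s.toNat).reverse).length : Int) ((bms.drop s.toNat).length : Int))
      = ((min ((bms.take s.toNat).reverse).length (bms.drop s.toNat).length : ℕ) : Int) := by
    simp [Nat.cast_min]
  rw [hmin, PySem.List.pyRange_zero_natCast, List.all_map]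
  unfold mirror
  simp only [Function.comp_def, PySem.List.pyGet?_natCast]
  exact all_range_eq_zip_all _ _

-- zip/all against the truncated other list is list equality
theorem zip_all_eq_beq_take (u v : List Int) (h : u.length ≤ v.length) :
    (u.zip v).all (fun p => p.1 == p.2) = (u == v.take u.length) := by
  induction u generalizing v with
  | nil => simp
  | cons x u' ih =>
    cases v with
    | nil => simp at h
    | cons y v' =>
      simp only [List.length_cons] at h
      simp only [List.zip_cons_cons, List.all_cons, List.length_cons, List.take_succ_cons,
        List.cons_beq_cons, ih v' (by omega)]

-- zip/all of the pair-equality test is symmetric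
theorem zip_all_comm (u v : List Int) :
    (u.zip v).all (fun p => p.1 == p.2) = (v.zip u).all (fun p => p.1 == p.2) := by
  induction u generalizing v with
  | nil => cases v <;> simp
  | cons x u' ih =>
    cases v with
    | nil => simp
    | cons y v' =>
      simp only [List.zip_cons_cons, List.all_cons, ih v', Bool.beq_comm]

-- a balanced concatenation is a palindrome iff the right half mirrors the left
theorem append_beq_reverse (p r : List Int) (h : p.length = r.length) :
    ((p ++ r) == (p ++ r).reverse) = (r == p.reverse) := by
  rw [Bool.eq_iff_iff, beq_iff_eq, beq_iff_eq, List.reverse_append]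
  constructor
  · intro he
    exact (List.append_inj he (by simpa using h)).2
  · intro he
    rw [he, List.reverse_reverse]

-- the palindrome-window test of B at split s
def palw (seq : List Int) (s : Int) : Bool :=
  (seq.take ((2 * s).toNat) == (seq.take ((2 * s).toNat)).reverse)

-- B's helper is the filter of the palindrome-window test
theorem palPrefixSplits_eq_filter (seq : List Int) (half : Int) :
    palPrefixSplits seq half
      = (PySem.List.pyRange 1 (half + 1) 1).filter (palw seq) := by
  unfold palPrefixSplits
  rw [PySem.List.foldl_append_if_eq_filter, List.nil_append]
  apply List.filter_congr
  intro s hs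
  rw [PySem.List.mem_pyRange_one] at hs
  simp only [PySem.List.slice_to seq (by omega : (0:Int) ≤ 2 * s),
    PySem.List.slice?_none_none_neg_one, Option.getD_some, palw]

-- the palindrome-window test equals the mirror test on the left half
theorem palw_eq_mirror (seq : List Int) (s : Int) (h1 : 1 ≤ s)
    (h2 : 2 * s ≤ (seq.length : Int)) : palw seq s = mirror seq s := by
  have hk : (2 * s).toNat = s.toNat + s.toNat := by omega
  have hkl : s.toNat ≤ seq.length := by omega
  have hq : s.toNat ≤ (seq.drop s.toNat).length := by
    rw [List.length_drop]; omega
  have hplen : (seq.take s.toNat).length = s.toNat := by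
    rw [List.length_take]; omega
  have hrlen : ((seq.drop s.toNat).take s.toNat).length = s.toNat := by
    rw [List.length_take]; omega
  unfold palw mirror
  rw [hk, List.take_add, append_beq_reverse _ _ (by omega),
    zip_all_eq_beq_take _ _ (by rw [List.length_reverse, hplen]; exact hq), List.length_reverse, hplen,
    Bool.eq_iff_iff, beq_iff_eq, beq_iff_eq]
  exact eq_comm

-- the mirror test at t of the reversed list is the mirror test at n - t
theorem mirror_reverse (bms : List Int) (t : Int) (h0 : 0 ≤ t)
    (h : t ≤ (bms.length : Int)) :
    mirror bms.reverse t = mirror bms ((bms.length : Int) - t) := by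
  have hnt : (((bms.length : Int) - t)).toNat = bms.length - t.toNat := by omega
  unfold mirror
  rw [hnt, List.take_reverse, List.drop_reverse, List.reverse_reverse]
  exact zip_all_comm _ _

-- descending relabelling of a range: [c - t for t in range(a,b)] reversed
theorem pyRange_map_sub_reverse (a b c : Int) :
    ((PySem.List.pyRange a b 1).map (fun t => c - t)).reverse
      = PySem.List.pyRange (c - b + 1) (c - a + 1) 1 := by
  apply List.ext_getElem
  · simp only [List.length_reverse, List.length_map, PySem.List.length_pyRange_one]; omega
  · intro i h1 h2
    simp only [List.length_reverse, List.length_map, PySem.List.length_pyRange_one] at h1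
    simp only [List.getElem_reverse, List.getElem_map, PySem.List.getElem_pyRange_one,
      List.length_map, PySem.List.length_pyRange_one]
    omega

-- B also computes the filter of the mirror test over range(1, len(bms))
theorem find_symm_alt_eq_filter (bms : List Int) :
    find_symm_alt bms = (PySem.List.pyRange 1 (bms.length : Int) 1).filter (mirror bms) := by
  by_cases hb : bms = []
  · subst hb; decide
  have hlp : 0 < bms.length := List.length_pos_of_ne_nil hb
  have hn : 1 ≤ (bms.length : Int) := by omega
  set n : Int := (bms.length : Int) with hndef
  unfold find_symm_alt
  simp only [PySem.List.slice?_none_none_neg_one, Option.getD_some,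
    PySem.Int.floordiv_eq_ediv_of_pos (by omega : (0:Int) < 2), ← hndef]
  rw [palPrefixSplits_eq_filter, palPrefixSplits_eq_filter]
  -- left half: the palindrome-window test is the mirror test
  have hleft : (PySem.List.pyRange 1 (n / 2 + 1) 1).filter (palw bms)
      = (PySem.List.pyRange 1 (n / 2 + 1) 1).filter (mirror bms) := by
    apply List.filter_congr
    intro s hs
    rw [PySem.List.mem_pyRange_one] at hs
    exact palw_eq_mirror bms s (by omega) (by omega)
  -- right half: palindromic prefixes of the reverse are mirrors at n - t
  have hright : (PySem.List.pyRange 1 ((n - 1) / 2 + 1) 1).filter (palw bms.reverse)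
      = (PySem.List.pyRange 1 ((n - 1) / 2 + 1) 1).filter (fun t => mirror bms (n - t)) := by
    apply List.filter_congr
    intro t ht
    rw [PySem.List.mem_pyRange_one] at ht
    rw [palw_eq_mirror bms.reverse t (by omega)
      (by rw [List.length_reverse, ← hndef]; omega)]
    exact mirror_reverse bms t (by omega) (by omega)
  rw [hleft, hright]
  -- split the full range at n/2 + 1
  rw [PySem.List.pyRange_one_append 1 (n / 2 + 1) n (by omega) (by omega), List.filter_append]
  congr 1
  -- the upper range is the reversed image of the t-range under n - t
  have hrange : PySem.List.pyRange (n / 2 + 1) n 1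
      = ((PySem.List.pyRange 1 ((n - 1) / 2 + 1) 1).map (fun t => n - t)).reverse := by
    rw [pyRange_map_sub_reverse]
    congr 1 <;> omega
  rw [hrange, List.filter_reverse, List.filter_map, ← List.map_reverse]
  simp only [Function.comp_def]

-- ===== VERDICT (by name: the statement is the Claim_ definition above) =====
theorem find_symm_spec : Claim_equal_find_symm := by
  intro bms _
  unfold Spec_find_symm
  rw [find_symm_eq_filter, find_symm_alt_eq_filter]
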